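-- pv_equiv track=rewrite | github.com/MrBrantCode/unitest_baseline | mut_generate/mist_train_cf/cf_15205/solution.py | generate_output_string
-- ===== SOURCE A (Python) =====
-- def generate_output_string(str1, str2):
--     output = ''
--     i = 0
--     j = 0
--
--     while i < len(str1) and j < len(str2):
--         if str1[i] not in output:
--             output += str1[i]
--         if str2[j] not in output:
--             output += str2[j]
--
--         i += 1
--         j += 1
--
--     # Add remaining characters from str1, if any
--     while i < len(str1):
--         if str1[i] not in output:
--             output += str1[i]
--         i += 1
--
--     # Add remaining characters from str2, if any
--     while j < len(str2):
--         if str2[j] not in output: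
--             output += str2[j]
--         j += 1
--
--     # Sort the output string in ascending order
--     output = ''.join(sorted(output))
--
--     return output
-- ===== SOURCE B (Python) =====
-- def generate_output_string(str1, str2):
--     out = []
--     for c in sorted(str1 + str2):
--         if not out or out[-1] != c:
--             out.append(c)
--     return ''.join(out)
-- ===== Notes on version B (the rewrite author's own statement) =====
-- stated objective: alternative
-- what changed: A tracks seen characters with a membership test against the growing output across three interleaved while-loops and sorts at the end; B sorts str1+str2 first and removes duplicates in one linear pass by comparing each character with the last one kept.
import Mathlib
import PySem

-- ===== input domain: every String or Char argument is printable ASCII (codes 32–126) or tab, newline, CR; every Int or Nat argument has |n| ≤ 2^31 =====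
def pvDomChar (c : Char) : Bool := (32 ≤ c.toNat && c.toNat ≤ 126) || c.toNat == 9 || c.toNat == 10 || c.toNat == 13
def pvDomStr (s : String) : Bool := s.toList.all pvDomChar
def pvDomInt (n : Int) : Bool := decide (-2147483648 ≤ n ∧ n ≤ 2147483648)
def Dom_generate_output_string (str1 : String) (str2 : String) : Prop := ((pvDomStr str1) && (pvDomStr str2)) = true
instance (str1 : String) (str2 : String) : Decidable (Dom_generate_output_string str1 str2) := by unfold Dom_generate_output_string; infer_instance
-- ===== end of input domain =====

-- B sorts str1+str2 first and collapses equal neighbours in one pass, instead of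
-- A's membership test against the growing output followed by a final sort (alternative decomposition).


-- ===== PORT A =====
-- 'if c not in output: output += c' (single-char membership in the accumulated output)
def pvAdd (out : List Char) (c : Char) : List Char :=
  if c ∈ out then out else out ++ [c]

-- the two trailing while-loops ('add remaining characters'): a left fold of pvAdd
def pvRest (l : List Char) (out : List Char) : List Char :=
  l.foldl pvAdd out

-- the first while-loop (both indices in range), then loop 2 over the rest of str1, loop 3 over the rest of str2
def pvLoop : List Char → List Char → List Char → List Char
  | [], l2, out => pvRest l2 (pvRest [] out)
  | c1 :: r1, [], out => pvRest [] (pvRest (c1 :: r1) out)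
  | c1 :: r1, c2 :: r2, out => pvLoop r1 r2 (pvAdd (pvAdd out c1) c2)

-- output = ''.join(sorted(output))
def generate_output_string (str1 : String) (str2 : String) : String :=
  String.ofList (PySem.List.sorted (pvLoop str1.toList str2.toList []) (fun x => x) false)

-- ===== PORT B =====
-- 'if not out or out[-1] != c: out.append(c)'
def pvStep (acc : List Char) (c : Char) : List Char :=
  if acc = [] ∨ acc.getLast? ≠ some c then acc ++ [c] else acc

def generate_output_string_alt (str1 : String) (str2 : String) : String :=
  String.ofList ((PySem.List.sorted (str1.toList ++ str2.toList) (fun x => x) false).foldl pvStep [])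

-- ===== PRECONDITION & SPEC =====
def Spec_generate_output_string (str1 : String) (str2 : String) (out : String) : Prop := out = generate_output_string_alt str1 str2
instance (str1 : String) (str2 : String) (out : String) : Decidable (Spec_generate_output_string str1 str2 out) := by unfold Spec_generate_output_string; infer_instance

-- ===== CLAIM (what is proved, stated in full; the proofs are below) =====
def Claim_equal_generate_output_string : Prop := ∀ (str1 : String) (str2 : String), Dom_generate_output_string str1 str2 → Spec_generate_output_string str1 str2 (generate_output_string str1 str2)

-- ===== LEMMAS AND PROOFS =====

-- front-to-back view of B's fold: drop each element equal to the last kept one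
def pvDD : Option Char → List Char → List Char
  | _, [] => []
  | lo, c :: r => if some c = lo then pvDD lo r else c :: pvDD (some c) r

lemma foldl_pvStep_eq_pvDD (l acc : List Char) :
    l.foldl pvStep acc = acc ++ pvDD acc.getLast? l := by
  induction l generalizing acc with
  | nil => simp [pvDD]
  | cons c r ih =>
    rw [List.foldl_cons]
    by_cases h : some c = acc.getLast?
    · have hne : acc ≠ [] := fun he => by simp [he] at h
      have hcond : ¬(acc = [] ∨ acc.getLast? ≠ some c) :=
        fun hor => hor.elim hne (fun hx => hx h.symm)
      rw [show pvStep acc c = acc from by unfold pvStep; rw [if_neg hcond]]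
      rw [ih, pvDD, if_pos h]
    · have hcond : acc = [] ∨ acc.getLast? ≠ some c := Or.inr fun he => h he.symm
      rw [show pvStep acc c = acc ++ [c] from by unfold pvStep; rw [if_pos hcond]]
      rw [ih, pvDD, if_neg h, List.getLast?_concat, List.append_assoc, List.singleton_append]

-- membership in pvAdd
lemma mem_pvAdd (out : List Char) (c x : Char) : x ∈ pvAdd out c ↔ x ∈ out ∨ x = c := by
  unfold pvAdd
  split
  · rename_i hc
    constructor
    · exact Or.inl
    · rintro (h | rfl)
      · exact h
      · exact hc
  · simp

lemma nodup_pvAdd (out : List Char) (c : Char) (h : out.Nodup) : (pvAdd out c).Nodup := by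
  unfold pvAdd
  split
  · exact h
  · rename_i hc
    rw [List.nodup_append]
    refine ⟨h, List.nodup_singleton c, ?_⟩
    intro a ha b hb
    rw [List.mem_singleton] at hb
    subst hb
    exact fun he => hc (he ▸ ha)

lemma mem_pvRest (l : List Char) (out : List Char) (x : Char) :
    x ∈ pvRest l out ↔ x ∈ out ∨ x ∈ l := by
  induction l generalizing out with
  | nil => simp [pvRest]
  | cons c r ih =>
    simp only [pvRest, List.foldl_cons] at *
    rw [ih (pvAdd out c), mem_pvAdd]
    simp
    tauto

lemma nodup_pvRest (l : List Char) (out : List Char) (h : out.Nodup) : (pvRest l out).Nodup := by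
  induction l generalizing out with
  | nil => simpa [pvRest]
  | cons c r ih =>
    simp only [pvRest, List.foldl_cons] at *
    exact ih _ (nodup_pvAdd _ _ h)

lemma mem_pvLoop (l1 l2 out : List Char) (x : Char) :
    x ∈ pvLoop l1 l2 out ↔ x ∈ out ∨ x ∈ l1 ∨ x ∈ l2 := by
  induction l1 generalizing l2 out with
  | nil =>
    rw [pvLoop, mem_pvRest, mem_pvRest]
    simp
  | cons c1 r1 ih =>
    cases l2 with
    | nil =>
      rw [pvLoop, mem_pvRest, mem_pvRest]
      simp
    | cons c2 r2 =>
      rw [pvLoop, ih, mem_pvAdd, mem_pvAdd]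
      simp
      tauto

lemma nodup_pvLoop (l1 l2 out : List Char) (h : out.Nodup) : (pvLoop l1 l2 out).Nodup := by
  induction l1 generalizing l2 out with
  | nil => rw [pvLoop]; exact nodup_pvRest _ _ (nodup_pvRest _ _ h)
  | cons c1 r1 ih =>
    cases l2 with
    | nil => rw [pvLoop]; exact nodup_pvRest _ _ (nodup_pvRest _ _ h)
    | cons c2 r2 => rw [pvLoop]; exact ih _ _ (nodup_pvAdd _ _ (nodup_pvAdd _ _ h))

-- membership in pvDD on a ≤-sorted list whose elements are all ≥ the last-kept value
lemma mem_pvDD (m : List Char) (hm : m.Pairwise (fun a b => a ≤ b)) :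
    ∀ (lo : Option Char), (∀ a, lo = some a → ∀ y ∈ m, a ≤ y) →
      ∀ x, (x ∈ pvDD lo m ↔ x ∈ m ∧ lo ≠ some x) := by
  induction m with
  | nil => simp [pvDD]
  | cons c r ih =>
    intro lo hlo x
    have hr : r.Pairwise (fun a b => a ≤ b) := hm.tail
    have hcr : ∀ y ∈ r, c ≤ y := fun y hy => (List.pairwise_cons.mp hm).1 y hy
    rw [pvDD]
    split
    · rename_i heq
      rw [ih hr lo (fun a ha y hy => hlo a ha y (List.mem_cons_of_mem _ hy)) x]
      subst heq
      constructor
      · rintro ⟨hx, hne⟩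
        exact ⟨List.mem_cons_of_mem _ hx, hne⟩
      · rintro ⟨hx, hne⟩
        rcases List.mem_cons.mp hx with rfl | hx
        · exact absurd rfl hne
        · exact ⟨hx, hne⟩
    · rename_i hne
      have hih := ih hr (some c) (fun a ha y hy => by injection ha with ha; exact ha ▸ hcr y hy) x
      simp only [List.mem_cons]
      constructor
      · rintro (rfl | hx)
        · exact ⟨Or.inl rfl, fun h => hne h.symm⟩
        · have hrx := hih.mp hx
          refine ⟨Or.inr hrx.1, ?_⟩
          rintro rfl
          have h1 : x ≤ c := hlo x rfl c List.mem_cons_self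
          have h2 : c ≤ x := hcr x hrx.1
          exact hrx.2 (congrArg some (le_antisymm h2 h1))
      · rintro ⟨rfl | hx, hlx⟩
        · exact Or.inl rfl
        · by_cases hxc : x = c
          · exact Or.inl hxc
          · right
            rw [hih]
            exact ⟨hx, fun h => hxc (by injection h with h; exact h.symm)⟩

lemma pairwise_lt_pvDD (m : List Char) (hm : m.Pairwise (fun a b => a ≤ b)) :
    ∀ lo : Option Char, (pvDD lo m).Pairwise (fun a b => a < b) := by
  induction m with
  | nil => simp [pvDD]
  | cons c r ih =>
    intro lo
    have hr : r.Pairwise (fun a b => a ≤ b) := hm.tail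
    have hcr : ∀ y ∈ r, c ≤ y := fun y hy => (List.pairwise_cons.mp hm).1 y hy
    rw [pvDD]
    split
    · exact ih hr lo
    · refine List.pairwise_cons.mpr ⟨?_, ih hr (some c)⟩
      intro x hx
      have hrx := (mem_pvDD r hr (some c) (fun a ha y hy => by injection ha with ha; exact ha ▸ hcr y hy) x).mp hx
      exact lt_of_le_of_ne (hcr x hrx.1) (fun h => hrx.2 (by rw [h]))

-- ===== VERDICT (by name: the statement is the Claim_ definition above) =====
theorem generate_output_string_spec : Claim_equal_generate_output_string := by
  intro str1 str2 _
  unfold Spec_generate_output_string generate_output_string generate_output_string_alt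
  have hmp : (PySem.List.sorted (str1.toList ++ str2.toList) (fun x => x) false).Pairwise
      (fun a b => a ≤ b) := by
    simpa using PySem.List.sorted_pairwise (str1.toList ++ str2.toList) (fun x => x)
  rw [foldl_pvStep_eq_pvDD]
  simp only [List.getLast?_nil, List.nil_append]
  have hmem : ∀ x, x ∈ pvDD none (PySem.List.sorted (str1.toList ++ str2.toList) (fun x => x) false)
      ↔ x ∈ pvLoop str1.toList str2.toList [] := by
    intro x
    rw [mem_pvDD _ hmp none (by simp), mem_pvLoop]
    simp [PySem.List.mem_sorted]
  have hlt := pairwise_lt_pvDD _ hmp none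
  have hysnd : (pvDD none (PySem.List.sorted (str1.toList ++ str2.toList) (fun x => x) false)).Nodup :=
    hlt.imp (fun h => ne_of_lt h)
  have handd : (pvLoop str1.toList str2.toList []).Nodup := nodup_pvLoop _ _ _ List.nodup_nil
  have hperm : (pvDD none (PySem.List.sorted (str1.toList ++ str2.toList) (fun x => x) false)).Perm
      (pvLoop str1.toList str2.toList []) := by
    apply List.perm_of_nodup_nodup_toFinset_eq hysnd handd
    ext x
    simp only [List.mem_toFinset]
    exact hmem x
  exact congrArg String.ofList
    (PySem.List.sorted_eq_of_perm_of_pairwise_lt _ _ _ hperm (by simpa using hlt))
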